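-- pv_equiv track=rewrite | github.com/carlgira/nqueens | tt.py | valid_sol
-- ===== SOURCE A (Python) =====
-- def valid_sol(sol, A):
--     if len(A) == 0:
--         return True
--
--     if len(sol) == 0:
--         return False
--
--     end = A[0] + (sol[0] if sol[0] == 7 else 1)
--     r = [v for v in A if v >= end]
--     return valid_sol(sol[1:], r)
-- ===== SOURCE B (Python) =====
-- def valid_sol(sol, A):
--     cur = A
--     for s in sol:
--         if not cur:
--             return True
--         end = cur[0] + (s if s == 7 else 1)
--         cur = [v for v in cur if v >= end]
--     return not cur
-- ===== Notes on version B (the rewrite author's own statement) =====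
-- stated objective: simpler
-- what changed: Replaced the recursion (with list slicing of sol at each level) by a single for-loop over sol maintaining the surviving A as an accumulator, with the final emptiness test after the loop.
import Mathlib
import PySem

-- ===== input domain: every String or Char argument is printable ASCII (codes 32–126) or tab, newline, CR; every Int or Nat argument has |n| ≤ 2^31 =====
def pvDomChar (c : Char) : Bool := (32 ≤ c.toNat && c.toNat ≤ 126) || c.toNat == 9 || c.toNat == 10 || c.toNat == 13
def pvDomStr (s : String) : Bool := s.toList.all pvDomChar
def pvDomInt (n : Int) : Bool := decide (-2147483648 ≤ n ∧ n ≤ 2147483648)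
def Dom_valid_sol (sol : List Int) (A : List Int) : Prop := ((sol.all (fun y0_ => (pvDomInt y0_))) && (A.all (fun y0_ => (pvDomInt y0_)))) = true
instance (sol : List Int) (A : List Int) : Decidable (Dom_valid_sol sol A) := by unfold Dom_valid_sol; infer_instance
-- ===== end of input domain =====

-- B replaces A's recursion (which slices sol each level) by one for-loop over sol
-- carrying the surviving elements of A; same values, simpler control flow.

-- ===== PORT A =====
-- literal transliteration of A's recursion: A empty → True; sol empty → False;
-- else filter A by end = A[0] + (sol[0] if sol[0] == 7 else 1) and recurse on sol[1:]
def valid_sol : List Int → List Int → Bool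
  | _, [] => true
  | [], _ :: _ => false
  | s :: rest, a :: tl =>
      let endv : Int := a + (if s = 7 then s else 1)
      valid_sol rest ((a :: tl).filter (fun v => endv ≤ v))

-- ===== PORT B =====
-- loop body of Source B: state = some cur while the loop is running, none once the
-- early 'return True' (cur empty) has fired
def validSolStep (st : Option (List Int)) (s : Int) : Option (List Int) :=
  match st with
  | none => none
  | some [] => none
  | some (a :: tl) =>
      let endv : Int := a + (if s = 7 then s else 1)
      some ((a :: tl).filter (fun v => endv ≤ v))

def valid_sol_alt (sol : List Int) (A : List Int) : Bool :=
  match sol.foldl validSolStep (some A) with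
  | none => true
  | some cur => cur.isEmpty

-- ===== PRECONDITION & SPEC =====
def Spec_valid_sol (sol : List Int) (A : List Int) (out : Bool) : Prop := out = valid_sol_alt sol A
instance (sol : List Int) (A : List Int) (out : Bool) : Decidable (Spec_valid_sol sol A out) := by unfold Spec_valid_sol; infer_instance

-- ===== CLAIM (what is proved, stated in full; the proofs are below) =====
def Claim_equal_valid_sol : Prop := ∀ (sol : List Int) (A : List Int), Dom_valid_sol sol A → Spec_valid_sol sol A (valid_sol sol A)

-- ===== LEMMAS AND PROOFS =====

theorem foldl_validSolStep_none (sol : List Int) :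
    sol.foldl validSolStep none = none := by
  induction sol with
  | nil => rfl
  | cons s rest ih => simpa [validSolStep] using ih

theorem valid_sol_eq_alt (sol A : List Int) : valid_sol sol A = valid_sol_alt sol A := by
  induction sol generalizing A with
  | nil =>
      cases A <;> simp [valid_sol, valid_sol_alt]
  | cons s rest ih =>
      cases A with
      | nil =>
          simp [valid_sol, valid_sol_alt, validSolStep, foldl_validSolStep_none]
      | cons a tl =>
          simpa [valid_sol, valid_sol_alt, validSolStep] using
            ih ((a :: tl).filter (fun v => a + (if s = 7 then s else 1) ≤ v))

-- ===== VERDICT (by name: the statement is the Claim_ definition above) =====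
theorem valid_sol_spec : Claim_equal_valid_sol := by
  intro sol A _
  unfold Spec_valid_sol
  exact valid_sol_eq_alt sol A
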